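-- pv_equiv track=rewrite | github.com/Rapto0/Rapot | api/main.py | _derive_manual_signal_type
-- ===== SOURCE A (Python) =====
-- def _derive_manual_signal_type(selected_timeframes: list[dict]) -> str:
--     buy_count = sum(
--         1 for timeframe in selected_timeframes if timeframe.get("signal_status") == "AL"
--     )
--     sell_count = sum(
--         1 for timeframe in selected_timeframes if timeframe.get("signal_status") == "SAT"
--     )
--
--     if buy_count > sell_count:
--         return "AL"
--     if sell_count > buy_count:
--         return "SAT"
--     return "NOTR"
-- ===== SOURCE B (Python) =====
-- def _derive_manual_signal_type(selected_timeframes: list[dict]) -> str: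
--     net = 0
--     for timeframe in selected_timeframes:
--         status = timeframe.get("signal_status")
--         if status == "AL":
--             net += 1
--         elif status == "SAT":
--             net -= 1
--     if net > 0:
--         return "AL"
--     if net < 0:
--         return "SAT"
--     return "NOTR"
-- ===== Notes on version B (the rewrite author's own statement) =====
-- stated objective: alternative
-- what changed: Replaces the two independent counting comprehensions and a count comparison by a single loop maintaining one signed net balance (+1 for AL, -1 for SAT) whose sign decides the verdict.
import Mathlib
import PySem

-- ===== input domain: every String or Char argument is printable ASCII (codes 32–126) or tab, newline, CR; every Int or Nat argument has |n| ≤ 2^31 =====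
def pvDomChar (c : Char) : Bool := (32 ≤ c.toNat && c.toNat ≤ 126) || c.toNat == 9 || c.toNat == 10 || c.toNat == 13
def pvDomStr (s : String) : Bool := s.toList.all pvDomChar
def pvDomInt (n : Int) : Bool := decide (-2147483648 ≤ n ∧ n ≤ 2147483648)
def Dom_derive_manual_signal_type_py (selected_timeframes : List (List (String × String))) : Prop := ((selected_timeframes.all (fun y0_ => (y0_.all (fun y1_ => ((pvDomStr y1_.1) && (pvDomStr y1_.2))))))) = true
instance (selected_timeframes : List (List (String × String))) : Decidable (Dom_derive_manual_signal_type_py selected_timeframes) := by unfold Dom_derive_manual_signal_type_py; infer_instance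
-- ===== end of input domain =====

-- B replaces A's two counting passes and count comparison by one pass over a single
-- signed net balance whose sign decides the verdict (alternative decomposition, same cost).

-- ===== PORT A =====
-- buy_count = sum(1 for tf in selected_timeframes if tf.get("signal_status") == "AL")
-- sell_count likewise with "SAT"; then compare the two counts.
def derive_manual_signal_type_py (selected_timeframes : List (List (String × String))) : String :=
  let buy_count : Int := selected_timeframes.foldl
    (fun acc timeframe => if (PySem.Dict.mk timeframe).get? "signal_status" == some "AL" then acc + 1 else acc) 0
  let sell_count : Int := selected_timeframes.foldl
    (fun acc timeframe => if (PySem.Dict.mk timeframe).get? "signal_status" == some "SAT" then acc + 1 else acc) 0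
  if buy_count > sell_count then "AL"
  else if sell_count > buy_count then "SAT"
  else "NOTR"

-- ===== PORT B =====
-- single loop: net += 1 on "AL", net -= 1 on "SAT"; verdict from the sign of net
def pvNetLoop (net : Int) : List (List (String × String)) → Int
  | [] => net
  | timeframe :: rest =>
      let status := (PySem.Dict.mk timeframe).get? "signal_status"
      pvNetLoop (if status == some "AL" then net + 1
                 else if status == some "SAT" then net - 1
                 else net) rest

def derive_manual_signal_type_py_alt (selected_timeframes : List (List (String × String))) : String :=
  let net := pvNetLoop 0 selected_timeframes
  if net > 0 then "AL"
  else if net < 0 then "SAT"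
  else "NOTR"

-- ===== PRECONDITION & SPEC =====
def Spec_derive_manual_signal_type_py (selected_timeframes : List (List (String × String))) (out : String) : Prop := out = derive_manual_signal_type_py_alt selected_timeframes
instance (selected_timeframes : List (List (String × String))) (out : String) : Decidable (Spec_derive_manual_signal_type_py selected_timeframes out) := by unfold Spec_derive_manual_signal_type_py; infer_instance

-- ===== CLAIM (what is proved, stated in full; the proofs are below) =====
def Claim_equal_derive_manual_signal_type_py : Prop := ∀ (selected_timeframes : List (List (String × String))), Dom_derive_manual_signal_type_py selected_timeframes → Spec_derive_manual_signal_type_py selected_timeframes (derive_manual_signal_type_py selected_timeframes)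

-- ===== LEMMAS AND PROOFS =====

-- the net loop equals its start plus (#AL - #SAT)
theorem pvNetLoop_eq (l : List (List (String × String))) : ∀ (net : Int),
    pvNetLoop net l =
      net + (l.countP (fun timeframe => (PySem.Dict.mk timeframe).get? "signal_status" == some "AL") : Int)
          - (l.countP (fun timeframe => (PySem.Dict.mk timeframe).get? "signal_status" == some "SAT") : Int) := by
  induction l with
  | nil => intro net; simp [pvNetLoop]
  | cons tf rest ih =>
    intro net
    simp only [pvNetLoop, ih, List.countP_cons]
    split_ifs <;> simp_all <;> omega

-- ===== VERDICT (by name: the statement is the Claim_ definition above) =====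
theorem derive_manual_signal_type_py_spec : Claim_equal_derive_manual_signal_type_py := by
  intro l _
  unfold Spec_derive_manual_signal_type_py derive_manual_signal_type_py derive_manual_signal_type_py_alt
  rw [pvNetLoop_eq, PySem.List.foldl_if_add_one, PySem.List.foldl_if_add_one]
  simp only [zero_add]
  split_ifs <;> first | rfl | omega
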